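-- pv_equiv track=rewrite | github.com/pypi-data/pypi-mirror-61 | packages/regtools/regtools-0.1.1-py3-none-any.whl/regtools/summarize/yesno.py | col_boolean_dict_from_list_of_lists_of_columns
-- ===== SOURCE A (Python) =====
-- from typing import List, Dict
--
-- ColBoolDict = Dict[str, List[bool]]
--
-- def col_boolean_dict_from_list_of_lists_of_columns(
--     column_list_list: List[List[str]],
-- ) -> ColBoolDict:
--     """
--
--     transforms [
--         ['a', 'b'],
--         ['a'],
--         ['b'],
--         None,
--         False,
--         [],
--         ['a','b']
--     ]
--
--     into {
--         'a': [True, True, False, False, False, False, True],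
--         'b': [True, False, True, False, False, False, True]
--     }
--     Returns:
--
--     """
--     all_columns = []
--     for column_list in column_list_list:
--         if column_list:
--             all_columns.extend(column_list)
--     all_columns = list(set(all_columns))
--
--     col_bool_dict: Dict[str, List[bool]] = {col: [] for col in all_columns}
--     for column_list in column_list_list:
--         if not column_list:
--             # None, False, [] for column list. Just add False to all columns
--             for column in col_bool_dict:
--                 col_bool_dict[column].append(False)
--         else:
--             # Valid column list
--             for column in col_bool_dict:
--                 if column in column_list:
--                     col_bool_dict[column].append(True)
--                 else:
--                     col_bool_dict[column].append(False)
--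
--     return col_bool_dict
-- ===== SOURCE B (Python) =====
-- from typing import List, Dict
--
-- ColBoolDict = Dict[str, List[bool]]
--
-- def col_boolean_dict_from_list_of_lists_of_columns(
--     column_list_list: List[List[str]],
-- ) -> ColBoolDict:
--     # Single streaming pass: columns are discovered as rows arrive; a newly seen
--     # column is backfilled with False for the i rows already processed. No
--     # separate column-universe pass.
--     result: ColBoolDict = {}
--     for i, row in enumerate(column_list_list):
--         if row:
--             for col in result:
--                 result[col].append(col in row)
--             for col in row:
--                 if col not in result:
--                     result[col] = [False] * i + [True]
--         else:
--             for col in result: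
--                 result[col].append(False)
--     return result
-- ===== Notes on version B (the rewrite author's own statement) =====
-- stated objective: faster
-- what changed: Replaces A's two staged passes (collect-and-dedup the column universe, then re-scan all rows appending one boolean per column) with a single streaming pass that discovers columns on the fly and backfills a newly seen column with False for the rows already processed.
import Mathlib
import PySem

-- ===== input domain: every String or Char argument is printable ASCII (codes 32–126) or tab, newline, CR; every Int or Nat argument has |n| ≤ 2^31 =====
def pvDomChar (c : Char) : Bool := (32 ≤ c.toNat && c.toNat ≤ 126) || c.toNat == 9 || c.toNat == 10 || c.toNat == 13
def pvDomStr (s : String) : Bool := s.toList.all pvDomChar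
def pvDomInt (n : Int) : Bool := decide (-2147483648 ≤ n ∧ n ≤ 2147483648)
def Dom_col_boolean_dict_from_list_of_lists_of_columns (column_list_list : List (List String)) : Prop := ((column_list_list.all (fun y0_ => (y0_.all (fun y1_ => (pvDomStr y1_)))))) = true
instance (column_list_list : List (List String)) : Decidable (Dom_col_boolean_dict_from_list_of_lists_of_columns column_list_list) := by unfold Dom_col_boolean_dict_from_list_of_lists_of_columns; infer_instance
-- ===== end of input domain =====

-- B replaces A's two staged passes (collect-and-dedup the column universe, then
-- re-scan all rows) by ONE streaming pass that discovers columns as rows arrive,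
-- backfilling a newly seen column with False for the rows already processed.
-- Within the Lean model both ports list the keys in first-occurrence order; Python's
-- list(set(...)) hash order is not modelled and dict outputs compare ignoring order.

-- ===== PORT A =====
def col_boolean_dict_from_list_of_lists_of_columns (column_list_list : List (List String)) : List (String × List Bool) :=
  -- all_columns = []; for column_list in column_list_list: if column_list: all_columns.extend(column_list)
  let allColumns : List String :=
    column_list_list.foldl (fun acc r => if r.isEmpty then acc else acc ++ r) []
  -- all_columns = list(set(all_columns))
  let allColumns : List String := PySem.Set.ofList allColumns
  -- col_bool_dict = {col: [] for col in all_columns}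
  let d0 : PySem.Dict String (List Bool) :=
    allColumns.foldl (fun d c => d.insert c []) PySem.Dict.empty
  -- for column_list in column_list_list: …
  let d : PySem.Dict String (List Bool) :=
    column_list_list.foldl (fun d r =>
      if r.isEmpty then
        -- for column in col_bool_dict: col_bool_dict[column].append(False)
        d.keys.foldl (fun d' c => d'.modify c [] (fun l => l ++ [false])) d
      else
        -- for column in col_bool_dict: append (column in column_list)
        d.keys.foldl (fun d' c => d'.modify c [] (fun l => l ++ [r.contains c])) d) d0
  d.items

-- ===== PORT B =====
def col_boolean_dict_from_list_of_lists_of_columns_alt (column_list_list : List (List String)) : List (String × List Bool) :=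
  -- result = {}; for i, row in enumerate(column_list_list): …
  (column_list_list.foldl (fun (st : Nat × List (String × List Bool)) r =>
    if r.isEmpty then
      -- for col in result: result[col].append(False)
      (st.1 + 1, st.2.map (fun p => (p.1, p.2 ++ [false])))
    else
      -- for col in result: result[col].append(col in row)
      let acc' := st.2.map (fun p => (p.1, p.2 ++ [r.contains p.1]))
      -- for col in row: if col not in result: result[col] = [False]*i + [True]
      (st.1 + 1,
       r.foldl (fun a c =>
         if a.any (fun p => p.1 == c) then a
         else a ++ [(c, List.replicate st.1 false ++ [true])]) acc')) (0, [])).2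

-- ===== PRECONDITION & SPEC =====
def Spec_col_boolean_dict_from_list_of_lists_of_columns (column_list_list : List (List String)) (out : List (String × List Bool)) : Prop := out = col_boolean_dict_from_list_of_lists_of_columns_alt column_list_list
instance (column_list_list : List (List String)) (out : List (String × List Bool)) : Decidable (Spec_col_boolean_dict_from_list_of_lists_of_columns column_list_list out) := by unfold Spec_col_boolean_dict_from_list_of_lists_of_columns; infer_instance

-- ===== CLAIM (what is proved, stated in full; the proofs are below) =====
def Claim_equal_col_boolean_dict_from_list_of_lists_of_columns : Prop := ∀ (column_list_list : List (List String)), Dom_col_boolean_dict_from_list_of_lists_of_columns column_list_list → Spec_col_boolean_dict_from_list_of_lists_of_columns column_list_list (col_boolean_dict_from_list_of_lists_of_columns column_list_list)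

-- ===== LEMMAS AND PROOFS =====

-- the common canonical value: per column, one boolean per row
def pvRowBool (c : String) (r : List String) : Bool := if r.isEmpty then false else r.contains c
def pvCols (rows : List (List String)) : List String :=
  PySem.Set.ofList ((rows.filter (fun r => !r.isEmpty)).flatMap (fun r => r))
def pvCanon (rows : List (List String)) : List (String × List Bool) :=
  (pvCols rows).map (fun c => (c, rows.map (pvRowBool c)))

-- ---------- A side ----------

-- the truthy-guarded extend loop gathers exactly the concatenation of the nonempty rows
lemma pv_gather_eq (rows : List (List String)) (acc : List String) :
    rows.foldl (fun acc r => if r.isEmpty then acc else acc ++ r) acc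
      = acc ++ (rows.filter (fun r => !r.isEmpty)).flatMap (fun r => r) := by
  induction rows generalizing acc with
  | nil => simp
  | cons r rows ih =>
    simp only [List.foldl_cons]
    by_cases h : r.isEmpty
    · have hr : r = [] := List.isEmpty_iff.mp h
      subst hr
      rw [if_pos h, ih]
      simp
    · rw [if_neg h, ih, List.filter_cons_of_pos (by simp [h])]
      simp [List.append_assoc]

lemma pv_set_update_of_subset (s l : List String) (h : ∀ x ∈ l, x ∈ s) :
    PySem.Set.update s l = s := by
  induction l generalizing s with
  | nil => rfl
  | cons x l ih =>
    have hx : x ∈ s := h x (by simp)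
    show PySem.Set.update (PySem.Set.add s x) l = s
    rw [PySem.Set.add_of_mem hx]
    exact ih s (fun y hy => h y (by simp [hy]))

lemma pv_filter_map_pairs (b : String → Bool) (c : String) :
    ∀ (ks : List String), ks.Nodup → c ∈ ks →
      (ks.map (fun x => (x, b x))).filter (fun p => p.1 == c) = [(c, b c)] := by
  intro ks
  induction ks with
  | nil => intro _ h; simp at h
  | cons k ks ih =>
    intro hnd hc
    rcases List.nodup_cons.mp hnd with ⟨hk, hnd'⟩
    rcases List.mem_cons.mp hc with rfl | hc'
    · have : (ks.map (fun x => (x, b x))).filter (fun p => p.1 == c) = [] := by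
        apply List.filter_eq_nil_iff.mpr
        intro p hp
        rcases List.mem_map.mp hp with ⟨x, hx, rfl⟩
        simp only [beq_iff_eq]
        intro hxc; exact hk (hxc ▸ hx)
      simp [this]
    · have hne : k ≠ c := fun h => hk (h ▸ hc')
      simp [hne, ih hnd' hc']

-- one row of A's inner loop appends b c to every column's list
lemma pv_row_step (cols : List String) (g : String → List Bool) (b : String → Bool)
    (d : PySem.Dict String (List Bool)) (hnd : cols.Nodup)
    (h : d.items = cols.map (fun c => (c, g c))) :
    (d.keys.foldl (fun d' c => d'.modify c [] (fun l => l ++ [b c])) d).items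
      = cols.map (fun c => (c, g c ++ [b c])) := by
  have hkeys : d.keys = cols := by
    simp [PySem.Dict.keys, h, Function.comp_def]
  have hknd : d.keys.Nodup := hkeys ▸ hnd
  set D := d.keys.foldl (fun d' c => d'.modify c [] (fun l => l ++ [b c])) d with hD
  have hpair : D = (d.keys.map (fun c => (c, b c))).foldl
      (fun d' p => d'.modify p.1 [] (fun l => l ++ [p.2])) d := by
    rw [hD, List.foldl_map]
  have hDkeys : D.keys = cols := by
    rw [hD, PySem.Dict.keys_foldl_modify, hkeys,
        pv_set_update_of_subset cols cols (fun x hx => hx)]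
  have hDnd : D.keys.Nodup := hDkeys ▸ hnd
  have hget : ∀ c ∈ cols, D.getD c [] = g c ++ [b c] := by
    intro c hc
    have hdget : d.getD c [] = g c := by
      apply PySem.Dict.getD_of_mem_items
      · rw [h]; exact List.mem_map.mpr ⟨c, hc, rfl⟩
      · exact hknd
    rw [hpair, PySem.Dict.getD_foldl_modify_append, hdget, hkeys,
        pv_filter_map_pairs b c cols hnd hc]
    simp
  rw [PySem.Dict.items_eq_map_keys D hDnd [], hDkeys]
  exact List.map_congr_left (fun c hc => by rw [hget c hc])

-- A's row loop, characterised
lemma pv_loop (rows : List (List String)) (cols : List String) (g : String → List Bool)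
    (d : PySem.Dict String (List Bool)) (hnd : cols.Nodup)
    (h : d.items = cols.map (fun c => (c, g c))) :
    (rows.foldl (fun d r =>
        if r.isEmpty then
          d.keys.foldl (fun d' c => d'.modify c [] (fun l => l ++ [false])) d
        else
          d.keys.foldl (fun d' c => d'.modify c [] (fun l => l ++ [r.contains c])) d) d).items
      = cols.map (fun c =>
          (c, g c ++ rows.map (fun r => if r.isEmpty then false else r.contains c))) := by
  induction rows generalizing g d with
  | nil => simpa using h
  | cons r rows ih =>
    simp only [List.foldl_cons]
    by_cases hr : r.isEmpty
    · rw [if_pos hr, ih (fun c => g c ++ [false]) _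
            (pv_row_step cols g (fun _ => false) d hnd h)]
      have hr' : r = [] := List.isEmpty_iff.mp hr
      subst hr'
      apply List.map_congr_left
      intro c _
      simp [List.append_assoc]
    · rw [if_neg hr, ih (fun c => g c ++ [r.contains c]) _
            (pv_row_step cols g (fun c => r.contains c) d hnd h)]
      apply List.map_congr_left
      intro c _
      simp [List.append_assoc]
      rintro hm rfl
      simp at hm

-- the initial {col: [] for col in all_columns}
lemma pv_init (cols : List String) (hnd : cols.Nodup) :
    (cols.foldl (fun d c => d.insert c ([] : List Bool)) PySem.Dict.empty).items
      = cols.map (fun c => (c, ([] : List Bool))) := by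
  have := PySem.Dict.items_foldl_insert_fresh (l := cols) (k := fun c => c)
      (v := fun _ => ([] : List Bool)) (d := PySem.Dict.empty)
      (by intro a _; exact PySem.Dict.contains_empty a) (by simpa using hnd)
  simpa using this

lemma pv_A_eq (rows : List (List String)) :
    col_boolean_dict_from_list_of_lists_of_columns rows = pvCanon rows := by
  simp only [col_boolean_dict_from_list_of_lists_of_columns]
  rw [pv_gather_eq rows []]
  rw [show PySem.Set.ofList (([] : List String) ++ (rows.filter (fun r => !r.isEmpty)).flatMap (fun r => r)) = pvCols rows from by simp [pvCols]]
  have hnd : (pvCols rows).Nodup := PySem.Set.nodup_ofList _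
  rw [pv_loop rows (pvCols rows) (fun _ => []) _ hnd (pv_init (pvCols rows) hnd)]
  simp [pvCanon, pvRowBool]

-- ---------- B side ----------

-- the new-column fold adds exactly the not-yet-seen columns, in order, all valued by F
lemma pv_add_new (F h : String → List Bool) :
    ∀ (r S : List String), S.Nodup → (∀ c ∈ r, c ∉ S → F c = h c) →
      r.foldl (fun a c => if a.any (fun p => p.1 == c) then a else a ++ [(c, h c)])
        (S.map (fun c => (c, F c)))
      = (PySem.Set.update S r).map (fun c => (c, F c)) := by
  intro r
  induction r with
  | nil => intro S _ _; rfl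
  | cons c r ih =>
    intro S hnd hside
    simp only [List.foldl_cons]
    have hany : (S.map (fun c => (c, F c))).any (fun p => p.1 == c) = decide (c ∈ S) := by
      simp [List.any_map, Function.comp_def, List.any_beq']
    by_cases hc : c ∈ S
    · rw [hany]
      rw [if_pos (by simpa using hc)]
      rw [show PySem.Set.update S (c :: r) = PySem.Set.update (PySem.Set.add S c) r from rfl,
          PySem.Set.add_of_mem hc]
      exact ih S hnd (fun x hx hxs => hside x (by simp [hx]) hxs)
    · rw [hany]
      rw [if_neg (by simpa using hc)]
      have hFc : F c = h c := hside c (by simp) hc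
      rw [show PySem.Set.update S (c :: r) = PySem.Set.update (PySem.Set.add S c) r from rfl,
          PySem.Set.add_of_not_mem hc]
      have : (S.map (fun x => (x, F x))) ++ [(c, h c)] = (S ++ [c]).map (fun x => (x, F x)) := by
        simp [hFc]
      rw [this]
      exact ih (S ++ [c])
        (by simp [List.nodup_append, hnd]; exact fun a ha h => hc (h ▸ ha))
        (fun x hx hxs => hside x (by simp [hx]) (fun hm => hxs (by simp [hm])))

-- a column unseen among the first rows has an all-False prefix there
lemma pv_backfill (pre : List (List String)) (c : String)
    (hc : c ∉ (pre.filter (fun r => !r.isEmpty)).flatMap (fun r => r)) :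
    pre.map (pvRowBool c) = List.replicate pre.length false := by
  rw [List.eq_replicate_iff]
  constructor
  · simp
  · intro b hb
    rcases List.mem_map.mp hb with ⟨r, hr, rfl⟩
    by_cases he : r.isEmpty
    · simp [pvRowBool, he]
    · have : c ∉ r := fun hm =>
        hc (List.mem_flatMap.mpr ⟨r, List.mem_filter.mpr ⟨hr, by simp [he]⟩, hm⟩)
      simp [pvRowBool, he]
      simpa using this

-- B's streaming loop, characterised by the canonical value of the processed prefix
lemma pv_B_loop : ∀ (rows pre : List (List String)),
    rows.foldl (fun (st : Nat × List (String × List Bool)) r =>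
      if r.isEmpty then
        (st.1 + 1, st.2.map (fun p => (p.1, p.2 ++ [false])))
      else
        (st.1 + 1,
         r.foldl (fun a c =>
           if a.any (fun p => p.1 == c) then a
           else a ++ [(c, List.replicate st.1 false ++ [true])])
           (st.2.map (fun p => (p.1, p.2 ++ [r.contains p.1])))))
      (pre.length, pvCanon pre)
    = ((pre ++ rows).length, pvCanon (pre ++ rows)) := by
  intro rows
  induction rows with
  | nil => intro pre; simp
  | cons r rows ih =>
    intro pre
    simp only [List.foldl_cons]
    have hkey : ∀ b, (pre ++ [r]).map (pvRowBool b) = pre.map (pvRowBool b) ++ [pvRowBool b r] := by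
      intro b; simp
    by_cases hr : r.isEmpty
    · rw [if_pos hr]
      have hr' : r = [] := List.isEmpty_iff.mp hr
      subst hr'
      have hstep : (pvCanon pre).map (fun p => (p.1, p.2 ++ [false]))
          = pvCanon (pre ++ [[]]) := by
        unfold pvCanon pvCols
        rw [List.map_map]
        have : (pre ++ [[]]).filter (fun r => !r.isEmpty) = pre.filter (fun r => !r.isEmpty) := by
          simp
        rw [this]
        refine List.map_congr_left (fun c _ => ?_)
        simp [pvRowBool]
      have hlen : pre.length + 1 = (pre ++ [[]]).length := by simp
      rw [hstep, hlen, ih (pre ++ [[]])]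
      simp
    · rw [if_neg hr]
      have hacc : (pvCanon pre).map (fun p => (p.1, p.2 ++ [r.contains p.1]))
          = (pvCols pre).map (fun c => (c, (pre ++ [r]).map (pvRowBool c))) := by
        unfold pvCanon
        rw [List.map_map]
        refine List.map_congr_left (fun c _ => ?_)
        simp [hkey, pvRowBool, hr]
      have hnd : (pvCols pre).Nodup := PySem.Set.nodup_ofList _
      have hside : ∀ c ∈ r, c ∉ pvCols pre →
          (pre ++ [r]).map (pvRowBool c) = List.replicate pre.length false ++ [true] := by
        intro c hc hns
        have hnf : c ∉ (pre.filter (fun x => !x.isEmpty)).flatMap (fun x => x) := by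
          intro hm; exact hns (by simpa [pvCols, PySem.Set.mem_ofList] using hm)
        rw [hkey, pv_backfill pre c hnf]
        have : pvRowBool c r = true := by
          simp [pvRowBool, hr]
          simpa using hc
        rw [this]
      have hcols : PySem.Set.update (pvCols pre) r = pvCols (pre ++ [r]) := by
        unfold pvCols
        have : ((pre ++ [r]).filter (fun x => !x.isEmpty))
            = pre.filter (fun x => !x.isEmpty) ++ [r] := by
          simp [hr]
        rw [this, List.flatMap_append, PySem.Set.ofList_append]
        simp
      rw [hacc, pv_add_new (fun c => (pre ++ [r]).map (pvRowBool c))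
            (fun _ => List.replicate pre.length false ++ [true]) r (pvCols pre) hnd hside,
          hcols]
      have hlen : pre.length + 1 = (pre ++ [r]).length := by simp
      rw [hlen]
      have : ((pvCols (pre ++ [r])).map (fun c => (c, (pre ++ [r]).map (pvRowBool c))))
          = pvCanon (pre ++ [r]) := rfl
      rw [this, ih (pre ++ [r])]
      simp

lemma pv_B_eq (rows : List (List String)) :
    col_boolean_dict_from_list_of_lists_of_columns_alt rows = pvCanon rows := by
  unfold col_boolean_dict_from_list_of_lists_of_columns_alt
  have := pv_B_loop rows []
  simp only [List.length_nil, List.nil_append] at this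
  rw [show pvCanon [] = [] from rfl] at this
  rw [this]

-- ===== VERDICT (by name: the statement is the Claim_ definition above) =====
theorem col_boolean_dict_from_list_of_lists_of_columns_spec : Claim_equal_col_boolean_dict_from_list_of_lists_of_columns := by
  intro rows _
  show _ = _
  rw [pv_A_eq, pv_B_eq]
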